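-- pv_equiv track=rewrite | github.com/0HOON/Algorithm_Study | 프로그래머스/3/214288. 상담원 인원/상담원 인원.py | wait_time
-- ===== SOURCE A (Python) =====
-- from heapq import heappush, heappop
--
-- def wait_time(k, n_mentor, reqs):
--     if len(reqs[k]) <= 0:
--         return 0
--
--     if n_mentor == 0:
--         return 999999999
--
--     hq = []
--     total_wait_time = 0
--     for a, b in reqs[k]:
--         if len(hq) < n_mentor:
--             heappush(hq, a+b)
--         else:
--             end_time = heappop(hq)
--             next_start_time = a
--             if end_time > a:
--                 total_wait_time += end_time-a
--                 next_start_time = end_time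
--             heappush(hq, next_start_time + b)
--     return total_wait_time
-- ===== SOURCE B (Python) =====
-- def wait_time(k, n_mentor, reqs):
--     if len(reqs[k]) <= 0:
--         return 0
--
--     if n_mentor == 0:
--         return 999999999
--
--     ends = []
--     total_wait_time = 0
--     for a, b in reqs[k]:
--         if len(ends) < n_mentor:
--             ends.append(a + b)
--         else:
--             end_time = min(ends)
--             ends.remove(end_time)
--             next_start_time = a
--             if end_time > a:
--                 total_wait_time += end_time - a
--                 next_start_time = end_time
--             ends.append(next_start_time + b)
--     return total_wait_time
-- ===== Notes on version B (the rewrite author's own statement) =====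
-- stated objective: simpler
-- what changed: Replaces the binary heap (heappush/heappop with sift-up/sift-down array surgery) by a plain list of counselor end times: each request scans the list with min(), removes that element and appends the new end time, so no heap invariant is maintained at all.
import Mathlib
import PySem

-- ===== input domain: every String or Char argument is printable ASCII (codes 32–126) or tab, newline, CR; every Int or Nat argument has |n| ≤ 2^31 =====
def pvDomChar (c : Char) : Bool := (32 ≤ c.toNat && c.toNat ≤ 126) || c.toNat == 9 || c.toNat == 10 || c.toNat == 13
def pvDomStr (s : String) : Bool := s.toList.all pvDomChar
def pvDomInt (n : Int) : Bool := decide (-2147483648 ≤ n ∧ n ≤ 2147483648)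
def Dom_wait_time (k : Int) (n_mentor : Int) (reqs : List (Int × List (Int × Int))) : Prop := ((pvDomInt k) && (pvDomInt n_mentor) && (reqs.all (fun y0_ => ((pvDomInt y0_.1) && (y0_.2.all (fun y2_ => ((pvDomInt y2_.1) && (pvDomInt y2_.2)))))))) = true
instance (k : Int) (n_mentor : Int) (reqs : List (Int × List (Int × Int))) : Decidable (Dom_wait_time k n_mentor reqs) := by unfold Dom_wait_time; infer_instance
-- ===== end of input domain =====

-- B replaces A's binary heap (heapq) by a plain list of end times scanned with min(); same return value on all admitted inputs.

-- ===== PORT A =====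
-- xs[i] for a Nat index that every call keeps in range (the heap algorithms index only valid positions)
def pvGet (h : List Int) (i : Nat) : Int := h.getD i 0

-- CPython heapq._siftdown(heap, 0, pos), exact: the single final write heap[pos] = newitem is performed at the
-- resting position; the cell at the current pos is never read before being overwritten, so carrying newitem is exact.
def pvSiftdown (h : List Int) (newitem : Int) (pos : Nat) : List Int :=
  if h0 : pos = 0 then h.set pos newitem
  else
    let parentpos := (pos - 1) / 2
    let parent := pvGet h parentpos
    if newitem < parent then pvSiftdown (h.set pos parent) newitem parentpos
    else h.set pos newitem
  termination_by pos
  decreasing_by omega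

-- CPython heapq.heappush
def pvHeappush (h : List Int) (item : Int) : List Int :=
  pvSiftdown (h ++ [item]) item h.length

-- CPython heapq._siftup(heap, pos), first phase: move the smaller child up until reaching a leaf
def pvSiftupLoop (h : List Int) (pos : Nat) : List Int × Nat :=
  if hc : 2 * pos + 1 < h.length then
    let childpos := 2 * pos + 1
    let c := if childpos + 1 < h.length ∧ ¬ pvGet h childpos < pvGet h (childpos + 1)
             then childpos + 1 else childpos
    pvSiftupLoop (h.set pos (pvGet h c)) c
  else (h, pos)
  termination_by h.length - pos
  decreasing_by simp only [List.length_set]; split <;> omega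

-- CPython heapq._siftup(heap, 0): walk down, then _siftdown back up from the leaf
def pvSiftup (h : List Int) : List Int :=
  let newitem := pvGet h 0
  let r := pvSiftupLoop h 0
  pvSiftdown r.1 newitem r.2

-- CPython heapq.heappop; the `none` branch is Python's IndexError on an empty heap (excluded by Pre_)
def pvHeappop (h : List Int) : Int × List Int :=
  match h.getLast? with
  | none => (0, [])
  | some lastelt =>
    let rest := h.dropLast
    if rest.isEmpty then (lastelt, [])
    else (pvGet rest 0, pvSiftup (rest.set 0 lastelt))

-- one iteration of A's for-loop; state = (hq, total_wait_time)
def pvStepA (n_mentor : Int) (s : List Int × Int) (ab : Int × Int) : List Int × Int :=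
  if (s.1.length : Int) < n_mentor then (pvHeappush s.1 (ab.1 + ab.2), s.2)
  else
    let p := pvHeappop s.1
    if p.1 > ab.1 then (pvHeappush p.2 (p.1 + ab.2), s.2 + (p.1 - ab.1))
    else (pvHeappush p.2 (ab.1 + ab.2), s.2)

def wait_time (k : Int) (n_mentor : Int) (reqs : List (Int × List (Int × Int))) : Int :=
  match (PySem.Dict.mk reqs).get? k with
  | none => 0      -- Python raises KeyError here; excluded by Pre_
  | some l =>
    if l.length ≤ 0 then 0
    else if n_mentor = 0 then 999999999
    else (l.foldl (pvStepA n_mentor) ([], 0)).2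

-- ===== PORT B =====
-- one iteration of B's for-loop; state = (ends, total_wait_time)
def pvStepB (n_mentor : Int) (s : List Int × Int) (ab : Int × Int) : List Int × Int :=
  if (s.1.length : Int) < n_mentor then (s.1 ++ [ab.1 + ab.2], s.2)
  else
    match PySem.List.min? s.1 (fun x => x) with
    | none => s      -- Python raises ValueError (min of empty list); excluded by Pre_
    | some m =>
      match PySem.List.remove? s.1 m with
      | none => s    -- unreachable: the minimum is a member
      | some ends =>
        if m > ab.1 then (ends ++ [m + ab.2], s.2 + (m - ab.1))
        else (ends ++ [ab.1 + ab.2], s.2)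

def wait_time_alt (k : Int) (n_mentor : Int) (reqs : List (Int × List (Int × Int))) : Int :=
  match (PySem.Dict.mk reqs).get? k with
  | none => 0      -- Python raises KeyError here; excluded by Pre_
  | some l =>
    if l.length ≤ 0 then 0
    else if n_mentor = 0 then 999999999
    else (l.foldl (pvStepB n_mentor) ([], 0)).2

-- ===== PRECONDITION & SPEC =====
-- Pre_ excludes exactly the inputs on which the Python A raises: k absent from reqs (KeyError), and a
-- negative n_mentor together with a nonempty request list (heappop of an empty heap, IndexError).
def Pre_wait_time (k : Int) (n_mentor : Int) (reqs : List (Int × List (Int × Int))) : Prop :=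
  ((PySem.Dict.mk reqs).get? k).isSome = true ∧
    (((PySem.Dict.mk reqs).get? k).getD [] = [] ∨ 0 ≤ n_mentor)
instance (k : Int) (n_mentor : Int) (reqs : List (Int × List (Int × Int))) : Decidable (Pre_wait_time k n_mentor reqs) := by unfold Pre_wait_time; infer_instance

def pvWitness_wait_time : Int × Int × (List (Int × List (Int × Int))) := (0, 1, [(0, [(0, 5), (1, 2)])])

def Spec_wait_time (k : Int) (n_mentor : Int) (reqs : List (Int × List (Int × Int))) (out : Int) : Prop := out = wait_time_alt k n_mentor reqs
instance (k : Int) (n_mentor : Int) (reqs : List (Int × List (Int × Int))) (out : Int) : Decidable (Spec_wait_time k n_mentor reqs out) := by unfold Spec_wait_time; infer_instance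

-- ===== CLAIM (what is proved, stated in full; the proofs are below) =====
def Claim_equal_wait_time : Prop := ∀ (k : Int) (n_mentor : Int) (reqs : List (Int × List (Int × Int))), Dom_wait_time k n_mentor reqs → Pre_wait_time k n_mentor reqs → Spec_wait_time k n_mentor reqs (wait_time k n_mentor reqs)

-- ===== LEMMAS AND PROOFS =====
-- the binary-heap shape on an array: children of i sit at 2i+1 and 2i+2
def pvChild (i j : Nat) : Prop := j = 2 * i + 1 ∨ j = 2 * i + 2
def pvIsHeap (h : List Int) : Prop := ∀ i j, pvChild i j → j < h.length → pvGet h i ≤ pvGet h j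

theorem pvGet_set (l : List Int) (i j : Nat) (a : Int) (hi : i < l.length) :
    pvGet (l.set i a) j = if j = i then a else pvGet l j := by
  unfold pvGet
  rcases Nat.lt_or_ge j l.length with hj | hj
  · rw [List.getD_eq_getElem _ _ (show j < (l.set i a).length by simpa using hj),
      List.getElem_set]
    by_cases hji : j = i
    · simp [hji]
    · rw [if_neg (fun h => hji h.symm), if_neg hji, List.getD_eq_getElem _ _ hj]
  · have hne : ¬ j = i := by omega
    rw [if_neg hne]
    unfold List.getD
    rw [List.getElem?_eq_none (by simpa using hj), List.getElem?_eq_none hj]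

theorem pvGet_append (l : List Int) (x : Int) (i : Nat) (hi : i < l.length) :
    pvGet (l ++ [x]) i = pvGet l i := by
  unfold pvGet
  rw [List.getD_eq_getElem _ _ (by simp; omega), List.getD_eq_getElem _ _ hi,
    List.getElem_append_left hi]

theorem pvGet_eq_getElem (l : List Int) (i : Nat) (hi : i < l.length) : pvGet l i = l[i] := by
  unfold pvGet; exact List.getD_eq_getElem _ _ hi

theorem pvCount_set_add (l : List Int) (i : Nat) (a v : Int) (hi : i < l.length) :
    (l.set i a).count v + (if l[i] = v then 1 else 0) = l.count v + (if a = v then 1 else 0) := by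
  have h1 := List.set_perm_cons_eraseIdx hi a
  have h2 := List.set_perm_cons_eraseIdx hi l[i]
  rw [List.set_getElem_self] at h2
  rw [h1.count_eq, h2.count_eq]
  simp only [List.count_cons]
  by_cases h : l[i] = v <;> by_cases h' : a = v <;> simp_all

theorem pvSwap_perm (h : List Int) (i j : Nat) (x : Int)
    (hi : i < h.length) (hj : j < h.length) (hne : i ≠ j) :
    ((h.set i (pvGet h j)).set j x).Perm (h.set i x) := by
  rw [List.perm_iff_count]
  intro v
  have c1 := pvCount_set_add (h.set i (pvGet h j)) j x v (by simpa using hj)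
  have c2 := pvCount_set_add h i (pvGet h j) v hi
  have c3 := pvCount_set_add h i x v hi
  have e1 : (h.set i (pvGet h j))[j]'(by simpa using hj) = h[j] := by
    rw [List.getElem_set]; simp [hne]
  have e2 : pvGet h j = h[j] := pvGet_eq_getElem _ _ hj
  rw [e1] at c1
  rw [e2] at c1 c2 ⊢
  split_ifs at c1 c2 c3 <;> omega

theorem pvSiftdown_spec : ∀ (pos : Nat) (h : List Int) (x : Int), pos < h.length →
    (∀ i j, pvChild i j → j < h.length → j ≠ pos → pvGet h i ≤ pvGet h j) →
    (∀ j, pvChild pos j → j < h.length → x ≤ pvGet h j) →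
    (∀ j, pvChild pos j → j < h.length → 0 < pos → pvGet h ((pos - 1) / 2) ≤ pvGet h j) →
    pvIsHeap (pvSiftdown h x pos) ∧ (pvSiftdown h x pos).Perm (h.set pos x) := by
  intro pos
  induction pos using Nat.strong_induction_on with
  | _ pos ih =>
  intro h x hpos hA hB hC
  rw [pvSiftdown]
  by_cases h0 : pos = 0
  · rw [dif_pos h0]; subst h0
    refine ⟨?_, List.Perm.refl _⟩
    intro i j hc hj
    rw [List.length_set] at hj
    rw [pvGet_set _ _ _ _ hpos, pvGet_set _ _ _ _ hpos]
    have hj0 : j ≠ 0 := by rcases hc with h' | h' <;> omega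
    rw [if_neg hj0]
    by_cases hi0 : i = 0
    · subst hi0; rw [if_pos rfl]; exact hB j hc hj
    · rw [if_neg hi0]; exact hA i j hc hj hj0
  · rw [dif_neg h0]
    by_cases hlt : x < pvGet h ((pos - 1) / 2)
    · rw [if_pos hlt]
      have hpp : (pos - 1) / 2 < pos := by omega
      have hppl : (pos - 1) / 2 < h.length := by omega
      have hcpp : pvChild ((pos - 1) / 2) pos := by unfold pvChild; omega
      have hlen' : (h.set pos (pvGet h ((pos - 1) / 2))).length = h.length := by simp
      have hget' : ∀ t, t < h.length →
          pvGet (h.set pos (pvGet h ((pos - 1) / 2))) t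
            = if t = pos then pvGet h ((pos - 1) / 2) else pvGet h t := by
        intro t _; exact pvGet_set _ _ _ _ hpos
      obtain ⟨hheap, hperm⟩ := ih ((pos - 1) / 2) hpp (h.set pos (pvGet h ((pos - 1) / 2))) x
        (by omega)
        (by -- A'
          intro i j hc hj hjpp
          rw [hlen'] at hj
          have hij : i < j := by rcases hc with h' | h' <;> omega
          rw [hget' i (by omega), hget' j hj]
          by_cases hjpos : j = pos
          · have hi' : i = (pos - 1) / 2 := by subst hjpos; rcases hc with h' | h' <;> omega
            rw [if_pos hjpos, if_neg (by omega : i ≠ pos), hi']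
          · rw [if_neg hjpos]
            by_cases hipos : i = pos
            · rw [if_pos hipos]
              exact hC j (by rw [← hipos]; exact hc) hj (by omega)
            · rw [if_neg hipos]
              exact hA i j hc hj hjpos)
        (by -- B'
          intro j hc hj
          rw [hlen'] at hj
          rw [hget' j hj]
          by_cases hjpos : j = pos
          · rw [if_pos hjpos]; exact le_of_lt hlt
          · rw [if_neg hjpos]
            exact le_trans (le_of_lt hlt) (hA ((pos - 1) / 2) j hc hj hjpos))
        (by -- C'
          intro j hc hj hpp0
          rw [hlen'] at hj
          have hgp : ((pos - 1) / 2 - 1) / 2 ≠ pos := by omega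
          have hgpc : pvChild (((pos - 1) / 2 - 1) / 2) ((pos - 1) / 2) := by
            unfold pvChild; omega
          rw [hget' _ (by omega), hget' j hj, if_neg hgp]
          have base : pvGet h (((pos - 1) / 2 - 1) / 2) ≤ pvGet h ((pos - 1) / 2) :=
            hA _ _ hgpc hppl (by omega)
          by_cases hjpos : j = pos
          · rw [if_pos hjpos]; exact base
          · rw [if_neg hjpos]
            exact le_trans base (hA ((pos - 1) / 2) j hc hj hjpos))
      refine ⟨hheap, hperm.trans ?_⟩
      exact pvSwap_perm h pos ((pos - 1) / 2) x hpos hppl (by omega)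
    · rw [if_neg hlt]
      refine ⟨?_, List.Perm.refl _⟩
      intro i j hc hj
      rw [List.length_set] at hj
      have hij : i < j := by rcases hc with h' | h' <;> omega
      rw [pvGet_set _ _ _ _ hpos, pvGet_set _ _ _ _ hpos]
      by_cases hjpos : j = pos
      · have hi' : i = (pos - 1) / 2 := by subst hjpos; rcases hc with h' | h' <;> omega
        rw [if_pos hjpos, if_neg (by omega : i ≠ pos), hi']
        exact not_lt.mp hlt
      · rw [if_neg hjpos]
        by_cases hipos : i = pos
        · subst hipos; rw [if_pos rfl]; exact hB j hc hj
        · rw [if_neg hipos]; exact hA i j hc hj hjpos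

theorem pvSiftupLoop_spec : ∀ (h : List Int) (pos : Nat) (x : Int), pos < h.length →
    (∀ i j, pvChild i j → j < h.length → i ≠ pos → j ≠ pos → pvGet h i ≤ pvGet h j) →
    (∀ j, pvChild pos j → j < h.length → 0 < pos → pvGet h ((pos - 1) / 2) ≤ pvGet h j) →
    pvIsHeap (pvSiftdown (pvSiftupLoop h pos).1 x (pvSiftupLoop h pos).2) ∧
      (pvSiftdown (pvSiftupLoop h pos).1 x (pvSiftupLoop h pos).2).Perm (h.set pos x) := by
  intro h pos
  fun_induction pvSiftupLoop h pos with
  | case2 h pos hc =>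
    intro x hpos hA2 hC2
    apply pvSiftdown_spec pos h x hpos
    · intro i j hcij hj hjpos
      by_cases hipos : i = pos
      · exfalso; subst hipos; rcases hcij with h' | h' <;> omega
      · exact hA2 i j hcij hj hipos hjpos
    · intro j hcij hj; exfalso; rcases hcij with h' | h' <;> omega
    · intro j hcij hj _; exfalso; rcases hcij with h' | h' <;> omega
  | case1 h pos hc childpos c ih =>
    intro x hpos hA2 hC2
    have hcc : c = childpos + 1 ∨ c = childpos := by simp only [c]; split <;> simp
    have hchild : childpos = 2 * pos + 1 := rfl
    have hcl : c < h.length := by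
      simp only [c]; split
      · omega
      · exact hc
    have hcpos : pvChild pos c := by unfold pvChild; omega
    have hposc : pos < c := by omega
    have hmin : ∀ j, pvChild pos j → j < h.length → pvGet h c ≤ pvGet h j := by
      intro j hcj hj
      have hj' : j = childpos ∨ j = childpos + 1 := by
        rcases hcj with h' | h' <;> omega
      simp only [c]
      split
      · next hcond =>
        rcases hj' with rfl | rfl
        · exact le_of_not_gt hcond.2
        · exact le_refl _
      · next hcond =>
        rcases hj' with rfl | rfl
        · exact le_refl _
        · rcases (Decidable.not_and_iff_not_or_not.mp hcond) with h' | h'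
          · omega
          · exact le_of_lt (not_not.mp h')
    have hlen' : (h.set pos (pvGet h c)).length = h.length := by simp
    have hget' : ∀ t, pvGet (h.set pos (pvGet h c)) t
        = if t = pos then pvGet h c else pvGet h t := by
      intro t; exact pvGet_set _ _ _ _ hpos
    obtain ⟨hheap, hperm⟩ := ih x (by omega)
      (by -- A2'
        intro i j hcij hj hic hjc
        rw [hlen'] at hj
        have hij : i < j := by rcases hcij with h' | h' <;> omega
        rw [hget' i, hget' j]
        by_cases hjpos : j = pos
        · have hi' : i = (pos - 1) / 2 := by subst hjpos; rcases hcij with h' | h' <;> omega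
          have hpos0 : 0 < pos := by omega
          rw [if_pos hjpos, if_neg (by omega : i ≠ pos), hi']
          exact hC2 c hcpos hcl hpos0
        · rw [if_neg hjpos]
          by_cases hipos : i = pos
          · rw [if_pos hipos]
            exact hmin j (by rw [← hipos]; exact hcij) hj
          · rw [if_neg hipos]
            exact hA2 i j hcij hj hipos hjpos)
      (by -- C2'
        intro j hcij hj _
        rw [hlen'] at hj
        have hcp : (c - 1) / 2 = pos := by omega
        have hjc : c < j := by rcases hcij with h' | h' <;> omega
        rw [hget' ((c - 1) / 2), hget' j, hcp, if_pos rfl, if_neg (by omega : j ≠ pos)]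
        exact hA2 c j hcij hj (by omega) (by omega))
    refine ⟨hheap, hperm.trans ?_⟩
    exact pvSwap_perm h pos c x hpos hcl (by omega)

theorem pvHeap_root_le (h : List Int) (hh : pvIsHeap h) :
    ∀ i, i < h.length → pvGet h 0 ≤ pvGet h i := by
  intro i
  induction i using Nat.strong_induction_on with
  | _ i ih =>
  intro hi
  rcases Nat.eq_zero_or_pos i with rfl | hpos
  · exact le_refl _
  · have hp : (i - 1) / 2 < i := by omega
    have hc : pvChild ((i - 1) / 2) i := by unfold pvChild; omega
    exact le_trans (ih _ hp (by omega)) (hh _ i hc hi)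

theorem pvHeappush_spec (h : List Int) (x : Int) (hh : pvIsHeap h) :
    pvIsHeap (pvHeappush h x) ∧ (pvHeappush h x).Perm (h ++ [x]) := by
  have hset : (h ++ [x]).set h.length x = h ++ [x] := by simp
  have := pvSiftdown_spec h.length (h ++ [x]) x (by simp)
    (by
      intro i j hc hj hjn
      have hij : i < j := by rcases hc with h' | h' <;> omega
      have hjl : j < h.length := by simp at hj; omega
      rw [pvGet_append _ _ _ (by omega), pvGet_append _ _ _ hjl]
      exact hh i j hc hjl)
    (by intro j hc hj; exfalso; simp at hj; rcases hc with h' | h' <;> omega)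
    (by intro j hc hj _; exfalso; simp at hj; rcases hc with h' | h' <;> omega)
  rw [hset] at this
  exact this

theorem pvHeappop_spec (h : List Int) (hh : pvIsHeap h) (hne : h ≠ []) :
    (pvHeappop h).1 = pvGet h 0 ∧ pvIsHeap (pvHeappop h).2 ∧
      ((pvHeappop h).1 :: (pvHeappop h).2).Perm h := by
  obtain ⟨le, hl⟩ : ∃ le, h.getLast? = some le := ⟨h.getLast hne, List.getLast?_eq_some_getLast hne⟩
  have hsplit : h.dropLast ++ [le] = h := by
    have := List.getLast?_eq_some_getLast hne
    rw [hl] at this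
    injection this with this
    rw [this]; exact List.dropLast_concat_getLast hne
  unfold pvHeappop
  rw [hl]
  by_cases hre : h.dropLast = []
  · simp only [hre, List.isEmpty_nil]
    have h1 : h = [le] := by rw [← hsplit, hre]; rfl
    refine ⟨by rw [h1]; rfl, by intro i j hc hj; simp at hj, ?_⟩
    rw [h1]; exact List.Perm.refl _
  · have hrel : 0 < h.dropLast.length := List.length_pos_iff.mpr hre
    simp only [List.isEmpty_iff, hre]
    set rest := h.dropLast
    have hlen2 : (rest.set 0 le).length = rest.length := by simp
    obtain ⟨hheap, hperm⟩ := pvSiftupLoop_spec (rest.set 0 le) 0 (pvGet (rest.set 0 le) 0)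
      (by omega)
      (by
        intro i j hc hj hi0 hj0
        rw [hlen2] at hj
        have hij : i < j := by rcases hc with h' | h' <;> omega
        rw [pvGet_set _ _ _ _ hrel, pvGet_set _ _ _ _ hrel, if_neg hi0, if_neg hj0]
        have e1 : pvGet rest i = pvGet h i := (pvGet_append rest le i (by omega)).symm.trans (by rw [hsplit])
        have e2 : pvGet rest j = pvGet h j := (pvGet_append rest le j hj).symm.trans (by rw [hsplit])
        rw [e1, e2]
        exact hh i j hc (by rw [← hsplit]; simp; omega))
      (by intro j hc hj h0; exact absurd h0 (by omega))
    have hself : (rest.set 0 le).set 0 (pvGet (rest.set 0 le) 0) = rest.set 0 le := by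
      rw [pvGet_eq_getElem _ _ (by omega)]
      exact List.set_getElem_self (by omega)
    rw [hself] at hperm
    have hfirst : pvGet rest 0 = pvGet h 0 := by
      rw [← hsplit]; exact (pvGet_append rest le 0 hrel).symm
    refine ⟨hfirst, hheap, ?_⟩
    obtain ⟨r0, rt, hr⟩ := List.ne_nil_iff_exists_cons.mp hre
    refine (List.Perm.cons (pvGet rest 0) hperm).trans ?_
    rw [← hsplit, hr, List.set_cons_zero, show pvGet (r0 :: rt) 0 = r0 from rfl]
    exact List.Perm.cons r0 (List.perm_append_singleton le rt).symm

theorem pvLoop_eq (n_mentor : Int) (hn : 1 ≤ n_mentor) :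
    ∀ (l : List (Int × Int)) (hq ends : List Int) (t : Int),
      hq.Perm ends → pvIsHeap hq →
      (l.foldl (pvStepA n_mentor) (hq, t)).2 = (l.foldl (pvStepB n_mentor) (ends, t)).2 := by
  intro l
  induction l with
  | nil => intro hq ends t _ _; rfl
  | cons ab l ih =>
    intro hq ends t hperm hheap
    have hlen : hq.length = ends.length := hperm.length_eq
    simp only [List.foldl_cons, pvStepA, pvStepB]
    by_cases hlt : (hq.length : Int) < n_mentor
    · rw [if_pos hlt, if_pos (show ((ends.length : Int) < n_mentor) by rw [← hlen]; exact hlt)]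
      obtain ⟨hheap', hperm'⟩ := pvHeappush_spec hq (ab.1 + ab.2) hheap
      exact ih _ _ _ (hperm'.trans (hperm.append_right _)) hheap'
    · rw [if_neg hlt, if_neg (show ¬ ((ends.length : Int) < n_mentor) by rw [← hlen]; exact hlt)]
      have hq0 : 0 < hq.length := by
        have h' : (1:Int) ≤ (hq.length : Int) := le_trans hn (not_lt.mp hlt)
        exact_mod_cast h'
      have hne : hq ≠ [] := by intro h0; rw [h0] at hq0; simp at hq0
      obtain ⟨hfst, hpopheap, hpopperm⟩ := pvHeappop_spec hq hheap hne
      cases hmin : PySem.List.min? ends (fun x => x) with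
      | none =>
        have h0 : ends = [] := (PySem.List.min?_eq_none_iff ends (fun x => x)).mp hmin
        subst h0
        exact absurd hperm.eq_nil hne
      | some m =>
        dsimp only
        have hm_mem := PySem.List.min?_mem hmin
        have hm_min := PySem.List.min?_isMin hmin
        rw [PySem.List.remove?_eq_some_erase ends m hm_mem]
        dsimp only
        have hr_mem : pvGet hq 0 ∈ hq := by
          rw [pvGet_eq_getElem _ _ hq0]; exact List.getElem_mem hq0
        have h1 : m ≤ pvGet hq 0 := hm_min _ (hperm.mem_iff.mp hr_mem)
        have h2 : pvGet hq 0 ≤ m := by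
          obtain ⟨idx, hidx, heq⟩ := List.mem_iff_getElem.mp (hperm.mem_iff.mpr hm_mem)
          calc pvGet hq 0 ≤ pvGet hq idx := pvHeap_root_le hq hheap idx hidx
            _ = m := by rw [pvGet_eq_getElem _ _ hidx, heq]
        have hrm : (pvHeappop hq).1 = m := by rw [hfst]; exact le_antisymm h2 h1
        have herase : (pvHeappop hq).2.Perm (ends.erase m) := by
          have h4 := (hpopperm.trans hperm).erase m
          rw [hrm] at h4
          simpa using h4
        rw [hrm]
        by_cases hgt : m > ab.1
        · rw [if_pos hgt, if_pos hgt]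
          obtain ⟨hheap', hperm'⟩ := pvHeappush_spec (pvHeappop hq).2 (m + ab.2) hpopheap
          exact ih _ _ _ (hperm'.trans (herase.append_right _)) hheap'
        · rw [if_neg hgt, if_neg hgt]
          obtain ⟨hheap', hperm'⟩ := pvHeappush_spec (pvHeappop hq).2 (ab.1 + ab.2) hpopheap
          exact ih _ _ _ (hperm'.trans (herase.append_right _)) hheap'

-- ===== VERDICT (by name: the statement is the Claim_ definition above) =====
theorem wait_time_spec : Claim_equal_wait_time := by
  intro k n_mentor reqs _hdom hpre
  unfold Spec_wait_time wait_time wait_time_alt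
  obtain ⟨hsome, hrest⟩ := hpre
  cases hget : (PySem.Dict.mk reqs).get? k with
  | none => simp [hget] at hsome
  | some l =>
    rw [hget] at hrest
    simp only [Option.getD_some] at hrest
    by_cases hlen : l.length ≤ 0
    · simp [hlen]
    · have hl : l ≠ [] := by intro h; subst h; simp at hlen
      have hn0 : 0 ≤ n_mentor := by
        rcases hrest with h | h
        · exact absurd h hl
        · exact h
      by_cases hz : n_mentor = 0
      · simp [hlen, hz]
      · have h1 : 1 ≤ n_mentor := by omega
        simp only [hlen, if_false, hz]
        exact pvLoop_eq n_mentor h1 l [] [] 0 (List.Perm.refl _) (by intro i j _ hj; simp at hj)
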